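-- pv_equiv track=rewrite | github.com/KisloTAooAnkit/Python-Programs | Dp-1/SubSeqProductLessThanK.py | foo
-- ===== SOURCE A (Python) =====
-- def foo(arr,k,n,prod):
--     if(n<0):
--         return 0
--     if(prod>k): #jabhi product ans ko cross karega wapas jao
--         return 0
--     ans =0
--     res = prod * arr[n]
--     if(res<k):
--         ans += 1+foo(arr,k,n-1,res)
--     ans += foo(arr,k,n-1,prod)
--
--     return ans
-- ===== SOURCE B (Python) =====
-- def foo(arr, k, n, prod):
--     # Iterative worklist of partial products replacing the include/exclude recursion.
--     if n < 0 or prod > k: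
--         return 0
--     partials = [prod]
--     count = 0
--     for i in range(n, -1, -1):
--         new = []
--         for p in partials:
--             r = p * arr[i]
--             if r < k:
--                 count += 1
--                 new.append(r)
--         partials.extend(new)
--     return count
-- ===== Notes on version B (the rewrite author's own statement) =====
-- stated objective: alternative
-- what changed: Replaces the exponential include/exclude recursion with an iterative worklist of pruned partial products: one pass over indices n..0, each level extending the list of partial products that stay below k and counting each as it is first formed.
import Mathlib
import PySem

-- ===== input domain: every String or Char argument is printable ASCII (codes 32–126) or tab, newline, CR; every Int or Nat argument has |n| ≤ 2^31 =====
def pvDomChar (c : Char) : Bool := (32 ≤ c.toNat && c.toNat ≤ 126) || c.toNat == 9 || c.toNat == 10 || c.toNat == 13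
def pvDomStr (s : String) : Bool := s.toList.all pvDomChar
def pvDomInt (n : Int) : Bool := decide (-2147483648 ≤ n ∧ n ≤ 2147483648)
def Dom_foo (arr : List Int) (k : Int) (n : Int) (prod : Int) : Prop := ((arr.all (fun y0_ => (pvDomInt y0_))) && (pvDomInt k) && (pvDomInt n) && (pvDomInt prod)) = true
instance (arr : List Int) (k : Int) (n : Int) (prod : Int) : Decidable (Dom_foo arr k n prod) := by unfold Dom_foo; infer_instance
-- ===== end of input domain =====

-- B replaces A's include/exclude recursion by an iterative worklist of pruned partial
-- products (alternative decomposition, same pruning, same count).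

-- ===== PORT A =====
-- Literal port of A's recursion; the arr[n] IndexError case (pyGet? = none) is excluded by Pre_foo.
def foo (arr : List Int) (k : Int) (n : Int) (prod : Int) : Int :=
  if n < 0 then 0
  else if prod > k then 0
  else
    match PySem.List.pyGet? arr n with
    | none => 0  -- Python raises IndexError here; outside Pre_foo
    | some a =>
      let res := prod * a
      let ans : Int := if res < k then 1 + foo arr k (n - 1) res else 0
      ans + foo arr k (n - 1) prod
termination_by (n + 1).toNat
decreasing_by all_goals omega

-- ===== PORT B =====
-- one level of the worklist loop: scan partials, count and collect new products < k
def fooAltInner (arr : List Int) (k : Int) (i : Int) (partials : List Int)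
    (acc : List Int × Int) : List Int × Int :=
  partials.foldl (fun acc p =>
    let r := p * PySem.List.pyGetD arr i 0
    if r < k then (acc.1 ++ [r], acc.2 + 1) else acc) acc

def foo_alt (arr : List Int) (k : Int) (n : Int) (prod : Int) : Int :=
  if n < 0 ∨ prod > k then 0
  else
    let st := (PySem.List.pyRange n (-1) (-1)).foldl
      (fun (st : List Int × Int) i =>
        let nw := fooAltInner arr k i st.1 ([], st.2)
        (st.1 ++ nw.1, nw.2)) ([prod], 0)
    st.2

-- ===== PRECONDITION & SPEC =====
-- Pre_foo excludes exactly the inputs on which Python A raises IndexError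
-- (n ≥ len(arr) reached with prod ≤ k); on them B raises identically.
def Pre_foo (arr : List Int) (k : Int) (n : Int) (prod : Int) : Prop :=
  n < (arr.length : Int) ∨ prod > k

instance (arr : List Int) (k : Int) (n : Int) (prod : Int) : Decidable (Pre_foo arr k n prod) := by
  unfold Pre_foo; infer_instance

def pvWitness_foo : List Int × Int × Int × Int := ([2, 3, 4], 10, 2, 1)

def Spec_foo (arr : List Int) (k : Int) (n : Int) (prod : Int) (out : Int) : Prop := out = foo_alt arr k n prod
instance (arr : List Int) (k : Int) (n : Int) (prod : Int) (out : Int) : Decidable (Spec_foo arr k n prod out) := by unfold Spec_foo; infer_instance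

-- ===== CLAIM (what is proved, stated in full; the proofs are below) =====
def Claim_equal_foo : Prop := ∀ (arr : List Int) (k : Int) (n : Int) (prod : Int), Dom_foo arr k n prod → Pre_foo arr k n prod → Spec_foo arr k n prod (foo arr k n prod)

-- ===== LEMMAS AND PROOFS =====

-- new partials produced at one level, as a filterMap
def newOf (arr : List Int) (k : Int) (i : Int) (P : List Int) : List Int :=
  P.filterMap (fun p => if p * PySem.List.pyGetD arr i 0 < k then some (p * PySem.List.pyGetD arr i 0) else none)

-- the worklist step function of foo_alt, in closed form
def gStep (arr : List Int) (k : Int) (st : List Int × Int) (i : Int) : List Int × Int :=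
  (st.1 ++ newOf arr k i st.1, st.2 + ((newOf arr k i st.1).length : Int))

theorem fooAltInner_eq (arr : List Int) (k : Int) (i : Int) (P : List Int)
    (l : List Int) (c : Int) :
    fooAltInner arr k i P (l, c) = (l ++ newOf arr k i P, c + ((newOf arr k i P).length : Int)) := by
  induction P generalizing l c with
  | nil => simp [fooAltInner, newOf]
  | cons p P ih =>
    simp only [fooAltInner, newOf, List.foldl_cons, List.filterMap_cons] at *
    by_cases h : p * PySem.List.pyGetD arr i 0 < k
    · simp only [if_pos h, ih]
      simp [List.append_assoc]
      omega
    · simp only [if_neg h, ih]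

theorem step_eq_gStep (arr : List Int) (k : Int) :
    (fun (st : List Int × Int) i =>
        let nw := fooAltInner arr k i st.1 ([], st.2)
        (st.1 ++ nw.1, nw.2)) = gStep arr k := by
  funext st i
  simp [fooAltInner_eq, gStep]

-- unfolding of foo in the non-pruned, in-range case
theorem foo_step (arr : List Int) (k : Int) (n : Int) (prod : Int)
    (hn : 0 ≤ n) (hlen : n < (arr.length : Int)) (hp : ¬ prod > k) :
    foo arr k n prod =
      (if prod * PySem.List.pyGetD arr n 0 < k
        then 1 + foo arr k (n - 1) (prod * PySem.List.pyGetD arr n 0) else 0)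
      + foo arr k (n - 1) prod := by
  rw [foo]
  rw [PySem.List.pyGet?_eq_some_getElem arr hn hlen,
      PySem.List.pyGetD_eq_getElem arr 0 hn hlen]
  simp [if_neg (by omega : ¬ n < 0), hp]

theorem foo_neg (arr : List Int) (k : Int) (n : Int) (prod : Int) (hn : n < 0) :
    foo arr k n prod = 0 := by
  rw [foo]; simp [hn]

-- one level of new partials folded into the per-element recursion of foo
theorem sum_step (arr : List Int) (k : Int) (j : Nat) (hlen : (j : Int) < (arr.length : Int))
    (P : List Int) (hP : ∀ p ∈ P, ¬ p > k) :
    (((newOf arr k (j : Int) P).length : Int)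
      + (P.map (foo arr k ((j : Int) - 1))).sum
      + ((newOf arr k (j : Int) P).map (foo arr k ((j : Int) - 1))).sum)
      = (P.map (foo arr k (j : Int))).sum := by
  induction P with
  | nil => simp [newOf]
  | cons p P ih =>
    have hpk : ¬ p > k := hP p (List.mem_cons_self ..)
    have hstep := foo_step arr k (j : Int) p (by omega) hlen hpk
    have ih' := ih (fun q hq => hP q (List.mem_cons_of_mem _ hq))
    simp only [newOf, List.filterMap_cons] at *
    by_cases h : p * PySem.List.pyGetD arr (j : Int) 0 < k
    · simp only [if_pos h, List.length_cons, List.map_cons, List.sum_cons] at *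
      rw [hstep]
      push_cast at *
      omega
    · simp only [if_neg h, List.map_cons, List.sum_cons] at *
      rw [hstep]
      omega

-- every freshly produced partial is itself below k
theorem newOf_le (arr : List Int) (k : Int) (i : Int) (P : List Int) :
    ∀ p ∈ newOf arr k i P, ¬ p > k := by
  intro p hp
  rcases List.mem_filterMap.mp hp with ⟨q, -, hq⟩
  split_ifs at hq with hlt
  rw [Option.some.injEq] at hq; omega

-- main loop invariant: running the worklist over indices j-1, j-2, …, 0 starting from
-- partials P and count c yields c plus the sum of foo at level j-1 over P
theorem loop_eq (arr : List Int) (k : Int) :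
    ∀ (j : Nat), (j : Int) ≤ (arr.length : Int) →
    ∀ (P : List Int) (c : Int), (∀ p ∈ P, ¬ p > k) →
    ((PySem.List.pyRange ((j : Int) - 1) (-1) (-1)).foldl (gStep arr k) (P, c)).2
      = c + (P.map (foo arr k ((j : Int) - 1))).sum := by
  intro j
  induction j with
  | zero =>
    intro _ P c _
    rw [PySem.List.pyRange_neg_one_eq_nil (by omega)]
    have h0 : (P.map (foo arr k (((0 : Nat) : Int) - 1))).sum = 0 := by
      rw [List.map_congr_left (fun p _ => foo_neg arr k _ p (by omega))]
      simp
    simp only [List.foldl_nil]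
    omega
  | succ j ih =>
    intro hlen P c hP
    have hj : ((j + 1 : Nat) : Int) - 1 = (j : Int) := by push_cast; ring
    rw [hj, PySem.List.pyRange_neg_one_cons (by omega : (-1 : Int) < (j : Int)),
        List.foldl_cons]
    have hg : gStep arr k (P, c) (j : Int)
        = (P ++ newOf arr k (j : Int) P, c + ((newOf arr k (j : Int) P).length : Int)) := rfl
    rw [hg]
    have hP' : ∀ p ∈ P ++ newOf arr k (j : Int) P, ¬ p > k := by
      intro p hp
      rcases List.mem_append.mp hp with h | h
      · exact hP p h
      · exact newOf_le arr k _ P p h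
    rw [ih (by omega) _ _ hP']
    rw [List.map_append, List.sum_append]
    have := sum_step arr k j (by omega) P hP
    omega

-- ===== VERDICT (by name: the statement is the Claim_ definition above) =====
theorem foo_spec : Claim_equal_foo := by
  intro arr k n prod _ hpre
  unfold Spec_foo foo_alt
  by_cases hk : prod > k
  · rw [foo]
    by_cases hn : n < 0 <;> simp [hn, hk]
  · have hlen : n < (arr.length : Int) := by
      rcases hpre with h | h
      · exact h
      · exact absurd h hk
    by_cases hn : n < 0
    · rw [foo_neg arr k n prod hn]; simp [hn]
    · simp only [if_neg (by omega : ¬ (n < 0 ∨ prod > k))]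
      rw [step_eq_gStep]
      have hj : n = ((n.toNat + 1 : Nat) : Int) - 1 := by omega
      have hlp := loop_eq arr k (n.toNat + 1) (by omega) [prod] 0
        (by intro p hp; simp at hp; omega)
      rw [hj, hlp]
      simp
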